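-- pv_equiv track=rewrite | github.com/ambipomyan/BraTSReg | BlockCoordinateDecent.py | getMaskVoxels
-- ===== SOURCE A (Python) =====
-- def getMaskVoxels(mask, S, H, W, C, Kid):
--     count = 0
--     N = 0
--     for i in range(H):
--         for j in range(W):
--             for k in range(C):
--                 v = mask[count]
--                 if v == Kid:
--                     S[0][N] = i
--                     S[1][N] = j
--                     S[2][N] = k
--                     N += 1
--                 count += 1
--
--     return N
-- ===== SOURCE B (Python) =====
-- def getMaskVoxels(mask, S, H, W, C, Kid):
--     # Flat scan over the voxel index; coordinates recovered by divmod arithmetic.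
--     if H <= 0 or W <= 0 or C <= 0:
--         return 0
--     N = 0
--     WC = W * C
--     for p in range(H * W * C):
--         if mask[p] == Kid:
--             S[0][N] = p // WC
--             S[1][N] = (p // C) % W
--             S[2][N] = p % C
--             N += 1
--     return N
-- ===== Notes on version B (the rewrite author's own statement) =====
-- stated objective: simpler
-- what changed: Replaced the three nested loops over (i,j,k) with a single flat loop over the voxel index p in range(H*W*C), recovering coordinates by divmod arithmetic, which also removes the running count variable.
import Mathlib
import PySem

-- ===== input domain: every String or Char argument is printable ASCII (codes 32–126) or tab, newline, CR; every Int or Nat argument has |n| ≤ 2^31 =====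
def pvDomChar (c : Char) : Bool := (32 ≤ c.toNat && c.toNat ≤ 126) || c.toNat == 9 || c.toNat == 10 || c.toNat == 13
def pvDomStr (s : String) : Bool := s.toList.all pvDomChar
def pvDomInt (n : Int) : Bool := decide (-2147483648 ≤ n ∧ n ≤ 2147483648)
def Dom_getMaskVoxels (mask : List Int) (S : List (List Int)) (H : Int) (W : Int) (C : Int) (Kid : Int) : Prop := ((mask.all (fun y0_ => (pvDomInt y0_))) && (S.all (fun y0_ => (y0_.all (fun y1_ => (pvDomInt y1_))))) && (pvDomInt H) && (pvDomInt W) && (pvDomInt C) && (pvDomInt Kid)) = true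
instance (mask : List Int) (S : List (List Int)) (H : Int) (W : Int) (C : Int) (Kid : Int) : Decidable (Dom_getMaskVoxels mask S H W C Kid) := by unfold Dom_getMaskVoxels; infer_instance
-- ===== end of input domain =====

-- B replaces A's three nested loops and running `count` by one flat loop over the voxel
-- index with divmod coordinate recovery (objective: simpler). Both Pythons mutate S in the
-- same way; the equivalence proved here is about the RETURN value N only (the S writes do
-- not affect it), so neither port models the writes into S.

-- ===== PORT A =====
-- triple nested loop, state (count, N); S writes affect only raising (excluded by Pre_), not N
def getMaskVoxels (mask : List Int) (S : List (List Int)) (H : Int) (W : Int) (C : Int) (Kid : Int) : Int :=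
  ((PySem.List.pyRange 0 H 1).foldl (fun (st : Int × Int) _i =>
    (PySem.List.pyRange 0 W 1).foldl (fun (st : Int × Int) _j =>
      (PySem.List.pyRange 0 C 1).foldl (fun (st : Int × Int) _k =>
        let v := PySem.List.pyGetD mask st.1 0
        if v == Kid then (st.1 + 1, st.2 + 1) else (st.1 + 1, st.2)) st) st) ((0 : Int), (0 : Int))).2

-- ===== PORT B =====
-- flat loop over p in range(H*W*C) after the degenerate-dimension early return
def getMaskVoxels_alt (mask : List Int) (S : List (List Int)) (H : Int) (W : Int) (C : Int) (Kid : Int) : Int :=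
  if H ≤ 0 ∨ W ≤ 0 ∨ C ≤ 0 then 0
  else
    (PySem.List.pyRange 0 (H * W * C) 1).foldl (fun (N : Int) p =>
      if PySem.List.pyGetD mask p 0 == Kid then N + 1 else N) 0

-- ===== PRECONDITION & SPEC =====
-- Pre_ excludes exactly the inputs where Python A raises an IndexError: the scan needs
-- H*W*C entries of mask, and each of the first three rows of S needs room for every match.
def Pre_getMaskVoxels (mask : List Int) (S : List (List Int)) (H : Int) (W : Int) (C : Int) (Kid : Int) : Prop :=
  let T : Nat := if 0 < H ∧ 0 < W ∧ 0 < C then (H * W * C).toNat else 0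
  let m : Nat := (mask.take T).countP (fun v => v == Kid)
  T ≤ mask.length ∧
    (m = 0 ∨ (3 ≤ S.length ∧ m ≤ (S.getD 0 []).length ∧ m ≤ (S.getD 1 []).length ∧ m ≤ (S.getD 2 []).length))
instance (mask : List Int) (S : List (List Int)) (H : Int) (W : Int) (C : Int) (Kid : Int) : Decidable (Pre_getMaskVoxels mask S H W C Kid) := by unfold Pre_getMaskVoxels; infer_instance

def pvWitness_getMaskVoxels : List Int × List (List Int) × Int × Int × Int × Int :=
  ([1, 2], [[0], [0], [0]], 1, 2, 1, 1)

def Spec_getMaskVoxels (mask : List Int) (S : List (List Int)) (H : Int) (W : Int) (C : Int) (Kid : Int) (out : Int) : Prop := out = getMaskVoxels_alt mask S H W C Kid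
instance (mask : List Int) (S : List (List Int)) (H : Int) (W : Int) (C : Int) (Kid : Int) (out : Int) : Decidable (Spec_getMaskVoxels mask S H W C Kid out) := by unfold Spec_getMaskVoxels; infer_instance

-- ===== CLAIM (what is proved, stated in full; the proofs are below) =====
def Claim_equal_getMaskVoxels : Prop := ∀ (mask : List Int) (S : List (List Int)) (H : Int) (W : Int) (C : Int) (Kid : Int), Dom_getMaskVoxels mask S H W C Kid → Pre_getMaskVoxels mask S H W C Kid → Spec_getMaskVoxels mask S H W C Kid (getMaskVoxels mask S H W C Kid)

-- ===== LEMMAS AND PROOFS =====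

-- number of positions c, c+1, ..., c+n-1 at which mask reads (with default 0) equal Kid
def pvCnt (mask : List Int) (Kid : Int) (c : Int) (n : Nat) : Int :=
  ((List.range n).countP (fun t : Nat => PySem.List.pyGetD mask (c + (t : Int)) 0 == Kid) : Nat)

theorem pvCnt_add (mask : List Int) (Kid c : Int) (a b : Nat) :
    pvCnt mask Kid c (a + b) = pvCnt mask Kid c a + pvCnt mask Kid (c + a) b := by
  unfold pvCnt
  rw [List.range_add, List.countP_append, List.countP_map]
  have harg : ∀ t : Nat, c + (((a + t : Nat)) : Int) = c + (a : Int) + (t : Int) := by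
    intro t; push_cast; ring
  simp only [Function.comp_def, harg]
  push_cast
  ring

theorem pv_foldl_const {α β : Type} (g : β → β) : ∀ (l : List α) (st : β),
    l.foldl (fun s _ => g s) st = g^[l.length] st := by
  intro l
  induction l with
  | nil => intro st; rfl
  | cons a l ih =>
      intro st
      simp [List.foldl_cons, ih, Function.iterate_succ_apply]

theorem pvIterBlock (mask : List Int) (Kid : Int) (b : Nat) (T : Int × Int → Int × Int)
    (hT : ∀ st : Int × Int, T st = (st.1 + (b : Int), st.2 + pvCnt mask Kid st.1 b)) :
    ∀ (m : Nat) (st : Int × Int), T^[m] st = (st.1 + ((m * b : Nat) : Int), st.2 + pvCnt mask Kid st.1 (m * b)) := by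
  intro m
  induction m with
  | zero => intro st; simp [pvCnt]
  | succ m ih =>
      intro st
      rw [Function.iterate_succ_apply, ih, hT]
      have h : (m + 1) * b = b + m * b := by ring
      rw [h, pvCnt_add]
      simp only [Prod.mk.injEq]
      constructor <;> push_cast <;> ring

theorem pvCnt_one (mask : List Int) (Kid c : Int) :
    pvCnt mask Kid c 1 = if PySem.List.pyGetD mask c 0 == Kid then 1 else 0 := by
  unfold pvCnt
  rw [List.range_one]
  simp only [List.countP_cons, List.countP_nil]
  split <;> simp_all

-- A's value is the number of matches among the first H.toNat * W.toNat * C.toNat positions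
theorem pv_portA (mask : List Int) (S : List (List Int)) (H W C Kid : Int) :
    getMaskVoxels mask S H W C Kid = pvCnt mask Kid 0 (H.toNat * (W.toNat * C.toNat)) := by
  unfold getMaskVoxels
  have hstep : ∀ st : Int × Int,
      (PySem.List.pyRange 0 C 1).foldl (fun (st : Int × Int) _k =>
        let v := PySem.List.pyGetD mask st.1 0
        if v == Kid then (st.1 + 1, st.2 + 1) else (st.1 + 1, st.2)) st
      = (st.1 + (C.toNat : Int), st.2 + pvCnt mask Kid st.1 C.toNat) := by
    intro st
    rw [pv_foldl_const (fun st : Int × Int =>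
        let v := PySem.List.pyGetD mask st.1 0
        if v == Kid then (st.1 + 1, st.2 + 1) else (st.1 + 1, st.2))]
    rw [PySem.List.length_pyRange_one]
    have := pvIterBlock mask Kid 1 (fun st : Int × Int =>
        let v := PySem.List.pyGetD mask st.1 0
        if v == Kid then (st.1 + 1, st.2 + 1) else (st.1 + 1, st.2))
      (by intro st; simp only [pvCnt_one]; split <;> simp) (C - 0).toNat st
    simpa using this
  have hmid : ∀ st : Int × Int,
      (PySem.List.pyRange 0 W 1).foldl (fun (st : Int × Int) _j =>
        (PySem.List.pyRange 0 C 1).foldl (fun (st : Int × Int) _k =>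
          let v := PySem.List.pyGetD mask st.1 0
          if v == Kid then (st.1 + 1, st.2 + 1) else (st.1 + 1, st.2)) st) st
      = (st.1 + ((W.toNat * C.toNat : Nat) : Int), st.2 + pvCnt mask Kid st.1 (W.toNat * C.toNat)) := by
    intro st
    rw [pv_foldl_const, PySem.List.length_pyRange_one]
    have := pvIterBlock mask Kid C.toNat _ hstep (W - 0).toNat st
    simpa using this
  rw [pv_foldl_const, PySem.List.length_pyRange_one]
  rw [pvIterBlock mask Kid (W.toNat * C.toNat) _ hmid (H - 0).toNat ((0 : Int), (0 : Int))]
  simp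

-- B's loop counts the same matches
theorem pv_portB_loop (mask : List Int) (Kid : Int) : ∀ (n : Nat) (N : Int),
    ((List.range n).map (fun k : Nat => ((0 : Int) + k))).foldl
      (fun (N : Int) p => if PySem.List.pyGetD mask p 0 == Kid then N + 1 else N) N
    = N + pvCnt mask Kid 0 n := by
  intro n
  induction n with
  | zero => intro N; simp [pvCnt]
  | succ n ih =>
      intro N
      rw [List.range_succ, List.map_append, List.foldl_append, ih]
      rw [pvCnt_add mask Kid 0 n 1, pvCnt_one]
      simp only [List.map_cons, List.map_nil, List.foldl_cons, List.foldl_nil]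
      split <;> ring

-- ===== VERDICT (by name: the statement is the Claim_ definition above) =====
theorem getMaskVoxels_spec : Claim_equal_getMaskVoxels := by
  intro mask S H W C Kid _hdom _hpre
  unfold Spec_getMaskVoxels getMaskVoxels_alt
  rw [pv_portA]
  by_cases h : H ≤ 0 ∨ W ≤ 0 ∨ C ≤ 0
  · rw [if_pos h]
    rcases h with h | h | h
    · have : H.toNat = 0 := Int.toNat_of_nonpos h
      simp [this, pvCnt]
    · have : W.toNat = 0 := Int.toNat_of_nonpos h
      simp [this, pvCnt]
    · have : C.toNat = 0 := Int.toNat_of_nonpos h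
      simp [this, pvCnt]
  · rw [if_neg h]
    push_neg at h
    obtain ⟨hH, hW, hC⟩ := h
    rw [PySem.List.pyRange_one, pv_portB_loop]
    have hprod : H * W * C = ((H.toNat * (W.toNat * C.toNat) : Nat) : Int) := by
      push_cast [Int.toNat_of_nonneg hH.le, Int.toNat_of_nonneg hW.le, Int.toNat_of_nonneg hC.le]
      ring
    have hT : (H * W * C - 0).toNat = H.toNat * (W.toNat * C.toNat) := by
      rw [sub_zero, hprod, Int.toNat_natCast]
    rw [hT]
    ring
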